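-- pv_equiv track=rewrite | github.com/exomukk/TranDangHuy-C4T-A03 | BTVN-Fuckthisshitimout/BTVN-3.py | minTile
-- ===== SOURCE A (Python) =====
-- def minTile(n,m):
--     if n == 0 or m == 0:
--         return 0
--
--     elif n % 2 == 0 and m % 2 == 0:
--         return minTile(int(n/2), int(m/2))
--
--     elif n % 2 == 0 and m % 2 == 1:
--         return (n + minTile(int(n/2), int(m/2)))
--
--     elif n % 2 == 1 and m % 2 == 0:
--         return (m + minTile(int(n/2), int(m/2)))
--
--     else:
--         return (n + m - 1 + minTile(int(n/2), int(m/2)))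
-- ===== SOURCE B (Python) =====
-- def minTile(n, m):
--     total = 0
--     while n != 0 and m != 0:
--         if n % 2 == 0 and m % 2 == 1:
--             total += n
--         elif n % 2 == 1 and m % 2 == 0:
--             total += m
--         elif n % 2 == 1 and m % 2 == 1:
--             total += n + m - 1
--         n, m = int(n/2), int(m/2)
--     return total
-- ===== Notes on version B (the rewrite author's own statement) =====
-- stated objective: simpler
-- what changed: Replaces the four-way recursive descent by an iterative while-loop with an explicit accumulator that adds the branch contribution and halves n and m (via int(n/2)) each round.
import Mathlib
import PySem

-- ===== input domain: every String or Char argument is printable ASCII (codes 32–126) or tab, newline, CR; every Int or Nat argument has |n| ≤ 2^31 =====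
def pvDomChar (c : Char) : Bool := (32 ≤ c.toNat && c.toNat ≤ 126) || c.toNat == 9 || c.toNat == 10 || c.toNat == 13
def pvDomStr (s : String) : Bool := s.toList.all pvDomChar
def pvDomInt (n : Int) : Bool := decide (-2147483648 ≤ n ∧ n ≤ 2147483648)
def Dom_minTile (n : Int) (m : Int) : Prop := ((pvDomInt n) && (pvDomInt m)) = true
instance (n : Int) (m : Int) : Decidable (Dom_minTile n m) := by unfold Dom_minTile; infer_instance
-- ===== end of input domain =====

-- B replaces A's recursion by an iterative accumulator loop over the same halving steps (objective: simpler).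

-- termination helper (cited by both ports' decreasing_by)
theorem natAbs_tdiv_two_lt (a : Int) (h : a ≠ 0) : (a.tdiv 2).natAbs < a.natAbs := by
  have ha : 0 < a.natAbs := Int.natAbs_pos.mpr h
  have h2 : a.natAbs / 2 < a.natAbs := Nat.div_lt_self ha (by norm_num)
  simpa [Int.natAbs_tdiv] using h2

-- ===== PORT A =====
-- `int(n/2)` is Python float division then truncation toward zero; on |n| ≤ 2^31 the float
-- quotient is exact, so it equals Int.tdiv n 2 (truncating division) — exact on Dom.
def minTile (n : Int) (m : Int) : Int :=
  if n = 0 ∨ m = 0 then 0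
  else if PySem.Int.mod n 2 = 0 ∧ PySem.Int.mod m 2 = 0 then
    minTile (n.tdiv 2) (m.tdiv 2)
  else if PySem.Int.mod n 2 = 0 ∧ PySem.Int.mod m 2 = 1 then
    n + minTile (n.tdiv 2) (m.tdiv 2)
  else if PySem.Int.mod n 2 = 1 ∧ PySem.Int.mod m 2 = 0 then
    m + minTile (n.tdiv 2) (m.tdiv 2)
  else
    n + m - 1 + minTile (n.tdiv 2) (m.tdiv 2)
termination_by n.natAbs + m.natAbs
decreasing_by
  all_goals
    have hn : n ≠ 0 := by tauto
    have hm : m ≠ 0 := by tauto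
    have := natAbs_tdiv_two_lt n hn
    have := natAbs_tdiv_two_lt m hm
    omega

-- ===== PORT B =====
-- the while-loop of Source B as a tail recursion on (total, n, m); int(n/2) = Int.tdiv n 2 as above
def minTileLoop (total : Int) (n : Int) (m : Int) : Int :=
  if h : n ≠ 0 ∧ m ≠ 0 then
    let total' :=
      if PySem.Int.mod n 2 = 0 ∧ PySem.Int.mod m 2 = 1 then total + n
      else if PySem.Int.mod n 2 = 1 ∧ PySem.Int.mod m 2 = 0 then total + m
      else if PySem.Int.mod n 2 = 1 ∧ PySem.Int.mod m 2 = 1 then total + (n + m - 1)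
      else total
    minTileLoop total' (n.tdiv 2) (m.tdiv 2)
  else total
termination_by n.natAbs + m.natAbs
decreasing_by
  have := natAbs_tdiv_two_lt n h.1
  have := natAbs_tdiv_two_lt m h.2
  omega

def minTile_alt (n : Int) (m : Int) : Int := minTileLoop 0 n m

-- ===== PRECONDITION & SPEC =====
def Spec_minTile (n : Int) (m : Int) (out : Int) : Prop := out = minTile_alt n m
instance (n : Int) (m : Int) (out : Int) : Decidable (Spec_minTile n m out) := by unfold Spec_minTile; infer_instance

-- ===== CLAIM (what is proved, stated in full; the proofs are below) =====
def Claim_equal_minTile : Prop := ∀ (n : Int) (m : Int), Dom_minTile n m → Spec_minTile n m (minTile n m)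

-- ===== LEMMAS AND PROOFS =====

-- loop invariant: the accumulator is carried outside A's recursion
theorem minTileLoop_eq (k : Nat) : ∀ (n m total : Int), n.natAbs + m.natAbs ≤ k →
    minTileLoop total n m = total + minTile n m := by
  induction k with
  | zero =>
    intro n m total hk
    have hn : n = 0 := by omega
    rw [minTileLoop, minTile]
    simp [hn]
  | succ k ih =>
    intro n m total hk
    rw [minTileLoop, minTile]
    by_cases h0 : n = 0 ∨ m = 0
    · have : ¬ (n ≠ 0 ∧ m ≠ 0) := by tauto
      simp [h0, this]
    · have h : n ≠ 0 ∧ m ≠ 0 := by tauto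
      have hrec : (n.tdiv 2).natAbs + (m.tdiv 2).natAbs ≤ k := by
        have := natAbs_tdiv_two_lt n h.1
        have := natAbs_tdiv_two_lt m h.2
        omega
      have hn2 : n % 2 = 0 ∨ n % 2 = 1 := Int.emod_two_eq n
      have hm2 : m % 2 = 0 ∨ m % 2 = 1 := Int.emod_two_eq m
      rcases hn2 with hn2 | hn2 <;> rcases hm2 with hm2 | hm2 <;>
        simp [h, hn2, hm2, ih _ _ _ hrec] <;> ring

-- ===== VERDICT (by name: the statement is the Claim_ definition above) =====
theorem minTile_spec : Claim_equal_minTile := by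
  intro n m _
  unfold Spec_minTile minTile_alt
  rw [minTileLoop_eq (n.natAbs + m.natAbs) n m 0 le_rfl]
  ring
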